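-- pv_equiv track=rewrite | github.com/docodocod/ssafy | D2/나무높이.py | grow_water
-- ===== SOURCE A (Python) =====
-- def grow_water(mx_tree,tree):
--     result=0
--     for i in range(len(tree)):
--         if mx_tree==tree[i]:
--             continue
--         goal=tree[i]
--         day=1
--         while True:
--             if day%2==1:
--                 goal+=1
--                 result+=1
--                 if goal==mx_tree:
--                     break
--                 elif goal==mx_tree-1:
--                     goal-=1
--             elif day%2==0:
--                 goal+=2
--                 result+=1
--                 if goal==mx_tree:
--                     break
--             day+=1
--     return result
-- ===== SOURCE B (Python) =====
-- def grow_water(mx_tree, tree):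
--     total = 0
--     for t in tree:
--         d = mx_tree - t
--         total += 2 * (d // 3) + d % 3
--     return total
-- ===== Notes on version B (the rewrite author's own statement) =====
-- stated objective: faster
-- what changed: Replaces A's per-tree day-by-day while-loop simulation with the closed form 2*(d//3)+d%3 per height gap d=mx_tree-t, summed in one pass; intended as faster (O(n) vs O(n*maxdiff)); a timing run measured A timing out at n=16 where B returned, so no ratio could be confirmed.
import Mathlib
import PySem

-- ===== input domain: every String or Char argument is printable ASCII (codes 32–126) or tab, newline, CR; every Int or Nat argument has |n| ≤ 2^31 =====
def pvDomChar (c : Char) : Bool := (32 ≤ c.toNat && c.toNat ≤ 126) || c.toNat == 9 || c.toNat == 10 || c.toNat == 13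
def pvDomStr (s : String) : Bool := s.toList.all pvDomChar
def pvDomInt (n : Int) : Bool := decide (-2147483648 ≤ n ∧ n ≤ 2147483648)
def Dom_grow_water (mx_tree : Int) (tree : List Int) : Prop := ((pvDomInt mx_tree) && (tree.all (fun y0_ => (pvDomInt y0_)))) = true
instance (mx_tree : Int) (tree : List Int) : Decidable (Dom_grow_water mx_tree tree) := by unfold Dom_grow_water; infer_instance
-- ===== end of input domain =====

-- B replaces A's per-tree day-by-day simulation by the closed form 2*(d//3)+d%3 per height gap d (intended as faster, O(n) per list vs A's O(n*maxdiff); a timing run saw A time out at n=16 where B returned, so no ratio was measured).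

-- ===== PORT A =====
-- A's inner `while True` loop; fuel only makes the recursion total (under Pre_ it never runs out).
def growLoopA (mx_tree : Int) : Nat → Int → Int → Int → Int
  | 0, _, _, result => result
  | fuel + 1, goal, day, result =>
    if day % 2 == 1 then
      let goal := goal + 1
      let result := result + 1
      if goal == mx_tree then result
      else if goal == mx_tree - 1 then growLoopA mx_tree fuel (goal - 1) (day + 1) result
      else growLoopA mx_tree fuel goal (day + 1) result
    else
      let goal := goal + 2
      let result := result + 1
      if goal == mx_tree then result
      else growLoopA mx_tree fuel goal (day + 1) result

def grow_water (mx_tree : Int) (tree : List Int) : Int :=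
  tree.foldl
    (fun result t =>
      if mx_tree == t then result
      else growLoopA mx_tree ((mx_tree - t).toNat + 2) t 1 result)
    0

-- ===== PORT B =====
def grow_water_alt (mx_tree : Int) (tree : List Int) : Int :=
  tree.foldl
    (fun total t =>
      let d := mx_tree - t
      total + (2 * PySem.Int.floordiv d 3 + PySem.Int.mod d 3))
    0

-- ===== PRECONDITION & SPEC =====
-- A's while loop never terminates when some tree height exceeds mx_tree (goal overshoots and never equals mx_tree), so those inputs are excluded.
def Pre_grow_water (mx_tree : Int) (tree : List Int) : Prop := ∀ t ∈ tree, t ≤ mx_tree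
instance (mx_tree : Int) (tree : List Int) : Decidable (Pre_grow_water mx_tree tree) := by unfold Pre_grow_water; infer_instance
def pvWitness_grow_water : Int × List Int := (7, [7, 3, 0, 6])

def Spec_grow_water (mx_tree : Int) (tree : List Int) (out : Int) : Prop := out = grow_water_alt mx_tree tree
instance (mx_tree : Int) (tree : List Int) (out : Int) : Decidable (Spec_grow_water mx_tree tree out) := by unfold Spec_grow_water; infer_instance

-- ===== CLAIM (what is proved, stated in full; the proofs are below) =====
def Claim_equal_grow_water : Prop := ∀ (mx_tree : Int) (tree : List Int), Dom_grow_water mx_tree tree → Pre_grow_water mx_tree tree → Spec_grow_water mx_tree tree (grow_water mx_tree tree)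

-- ===== LEMMAS AND PROOFS =====

-- A's loop from gap d ≥ 1 on any odd day adds exactly 2*(d/3) + d%3 to result (given enough fuel).
-- one unfolding of A's loop on an odd day
theorem growLoopA_odd (mx goal day r : Int) (fuel : Nat) (h : day % 2 = 1) :
    growLoopA mx (fuel + 1) goal day r =
      if goal + 1 = mx then r + 1
      else if goal + 1 = mx - 1 then growLoopA mx fuel goal (day + 1) (r + 1)
      else growLoopA mx fuel (goal + 1) (day + 1) (r + 1) := by
  simp only [growLoopA, beq_iff_eq, h]
  norm_num

-- one unfolding of A's loop on an even day
theorem growLoopA_even (mx goal day r : Int) (fuel : Nat) (h : day % 2 = 0) :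
    growLoopA mx (fuel + 1) goal day r =
      if goal + 2 = mx then r + 1
      else growLoopA mx fuel (goal + 2) (day + 1) (r + 1) := by
  simp only [growLoopA, beq_iff_eq, h]
  norm_num

-- A's loop from gap d ≥ 1 on any odd day adds exactly 2*(d/3) + d%3 to result (given enough fuel).
theorem growLoopA_closed :
    ∀ (d : Nat) (mx_tree day result : Int) (fuel : Nat),
      1 ≤ d → day % 2 = 1 → d ≤ fuel →
      growLoopA mx_tree fuel (mx_tree - d) day result = result + (2 * (d / 3 : Nat) + (d % 3 : Nat)) := by
  intro d
  induction d using Nat.strong_induction_on with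
  | _ d ih =>
    intro mx_tree day result fuel hd hday hfuel
    rcases Nat.lt_or_ge d 4 with h4 | h4
    · interval_cases d
      · obtain ⟨f, rfl⟩ : ∃ f, fuel = f + 1 := ⟨fuel - 1, by omega⟩
        rw [growLoopA_odd _ _ _ _ _ hday, if_pos (by omega)]
        omega
      · obtain ⟨f, rfl⟩ : ∃ f, fuel = f + 1 + 1 := ⟨fuel - 2, by omega⟩
        rw [growLoopA_odd _ _ _ _ _ hday, if_neg (by omega), if_pos (by omega),
          growLoopA_even _ _ _ _ _ (by omega), if_pos (by omega)]
        omega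
      · obtain ⟨f, rfl⟩ : ∃ f, fuel = f + 1 + 1 := ⟨fuel - 2, by omega⟩
        rw [growLoopA_odd _ _ _ _ _ hday, if_neg (by omega), if_neg (by omega),
          growLoopA_even _ _ _ _ _ (by omega), if_pos (by omega)]
        omega
    · obtain ⟨n, rfl⟩ : ∃ n, d = n + 4 := ⟨d - 4, by omega⟩
      obtain ⟨f, rfl⟩ : ∃ f, fuel = f + 1 + 1 := ⟨fuel - 2, by omega⟩
      rw [growLoopA_odd _ _ _ _ _ hday, if_neg (by omega), if_neg (by omega),
        growLoopA_even _ _ _ _ _ (by omega), if_neg (by omega)]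
      rw [show mx_tree - (↑(n + 4) : Int) + 1 + 2 = mx_tree - ((n + 1 : Nat) : Int) by push_cast; ring]
      rw [ih (n + 1) (by omega) mx_tree (day + 1 + 1) (result + 1 + 1) f (by omega) (by omega) (by omega)]
      omega

-- the per-element step functions agree when t ≤ mx_tree
theorem step_eq (mx_tree t result : Int) (h : t ≤ mx_tree) :
    (if mx_tree == t then result
     else growLoopA mx_tree ((mx_tree - t).toNat + 2) t 1 result) =
    result + (2 * PySem.Int.floordiv (mx_tree - t) 3 + PySem.Int.mod (mx_tree - t) 3) := by
  rw [PySem.Int.floordiv_eq_ediv_of_pos (by norm_num), PySem.Int.mod_eq_emod_of_pos (by norm_num)]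
  set d : Nat := (mx_tree - t).toNat with hdn
  have hdi : mx_tree - t = (d : Int) := by omega
  by_cases hmt : mx_tree = t
  · subst hmt
    simp
  · rw [if_neg (by simpa using hmt)]
    have hgoal : t = mx_tree - (d : Int) := by omega
    rw [hgoal, growLoopA_closed d mx_tree 1 result (d + 2) (by omega) (by norm_num) (by omega)]
    omega

theorem fold_eq (mx_tree : Int) (tree : List Int) (hpre : ∀ t ∈ tree, t ≤ mx_tree) :
    ∀ (acc : Int),
      tree.foldl (fun result t => if mx_tree == t then result
          else growLoopA mx_tree ((mx_tree - t).toNat + 2) t 1 result) acc =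
      tree.foldl (fun total t =>
          let d := mx_tree - t
          total + (2 * PySem.Int.floordiv d 3 + PySem.Int.mod d 3)) acc := by
  induction tree with
  | nil => intro acc; rfl
  | cons t ts ih =>
    intro acc
    simp only [List.foldl_cons]
    rw [step_eq mx_tree t acc (hpre t (by simp))]
    exact ih (fun x hx => hpre x (by simp [hx])) _

-- ===== VERDICT (by name: the statement is the Claim_ definition above) =====
theorem grow_water_spec : Claim_equal_grow_water := by
  intro mx_tree tree _ hpre
  unfold Spec_grow_water grow_water grow_water_alt
  exact fold_eq mx_tree tree hpre 0
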